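-- pv_equiv track=rewrite | github.com/award94/COSC4315 | HW3/compute.py | parsecomma
-- ===== SOURCE A (Python) =====
-- def parsecomma(rawinput, i, parenend, parenstack):
--     if(i >= parenend):
--         return -1
--
--     if(rawinput[i] == '('):
--         parenstack += '('
--     if(rawinput[i] == ')'):
--         parenstack.pop()
--
--     if(parenstack.__len__() == 0 and rawinput[i] == ','):
--         return i
--
--     return parsecomma(rawinput, i+1, parenend, parenstack)
-- ===== SOURCE B (Python) =====
-- def parsecomma(rawinput, i, parenend, parenstack):
--     while i < parenend:
--         c = rawinput[i]
--         if c == '(':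
--             parenstack.append('(')
--         elif c == ')':
--             parenstack.pop()
--         if not parenstack and c == ',':
--             return i
--         i += 1
--     return -1
-- ===== Notes on version B (the rewrite author's own statement) =====
-- stated objective: simpler
-- what changed: Replaces A's deep tail recursion (one Python stack frame per character) by a plain while loop over the index, mutating the same parenstack list in place so side effects and the IndexError on popping an empty stack are identical.
-- outside the precondition, e.g. on parsecomma(',', -1, 1, []): A returns -1, B returns -1; on parsecomma(',)', 0, 2, []): A returns 0, B returns 0; on parsecomma(',', 0, 5, []): A returns 0, B returns 0
import Mathlib
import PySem

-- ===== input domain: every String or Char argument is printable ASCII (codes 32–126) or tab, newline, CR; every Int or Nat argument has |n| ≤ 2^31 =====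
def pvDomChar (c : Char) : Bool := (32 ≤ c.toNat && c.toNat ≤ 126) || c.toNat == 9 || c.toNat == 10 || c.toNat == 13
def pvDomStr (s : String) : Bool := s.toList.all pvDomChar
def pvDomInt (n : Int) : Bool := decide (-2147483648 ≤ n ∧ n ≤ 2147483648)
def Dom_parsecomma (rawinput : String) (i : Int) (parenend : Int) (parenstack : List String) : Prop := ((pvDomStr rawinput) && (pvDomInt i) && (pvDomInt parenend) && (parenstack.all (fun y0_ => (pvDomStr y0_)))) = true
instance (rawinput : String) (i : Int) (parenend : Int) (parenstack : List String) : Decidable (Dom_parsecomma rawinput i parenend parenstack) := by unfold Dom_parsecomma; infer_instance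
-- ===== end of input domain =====

-- B replaces A's per-character tail recursion by a single iterative scan (ported as a foldl over
-- the index range); return values agree on Pre_, and the Python B performs the identical in-place
-- mutations of parenstack as A (equivalence proved here is about the return value).


-- ===== PORT A =====
-- literal transliteration of A's recursion; the `none`/pop-failure branches are Python's
-- IndexError (rawinput[i] out of range / pop of empty list), excluded by Pre_ below.
def parsecomma (rawinput : String) (i : Int) (parenend : Int) (parenstack : List String) : Int :=
  if h : i ≥ parenend then -1
  else
    match PySem.Str.pyGet? rawinput i with
    | none => 0  -- IndexError in Python (outside Pre_)
    | some c =>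
      let st1 := if c = '(' then parenstack ++ ["("] else parenstack
      let st2 := if c = ')' then
          match PySem.List.pop? st1 with
          | none => []  -- IndexError in Python (outside Pre_)
          | some (_, rest) => rest
        else st1
      if st2.length = 0 ∧ c = ',' then i
      else parsecomma rawinput (i + 1) parenend st2
termination_by (parenend - i).toNat
decreasing_by omega

-- ===== PORT B =====
-- transliteration of Source B's while loop: one foldl over the index range, state = (found?, stack)
def pcStep (rawinput : String) (st : Option Int × List String) (j : Int) : Option Int × List String :=
  match st with
  | (some r, s) => (some r, s)   -- already returned
  | (none, s) =>
    let c := (PySem.Str.pyGet? rawinput j).getD ' '  -- IndexError in Python (outside Pre_)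
    let s' := if c = '(' then s ++ ["("]
              else if c = ')' then s.dropLast        -- pop; empty pop is outside Pre_
              else s
    if s' = [] ∧ c = ',' then (some j, s') else (none, s')

def parsecomma_alt (rawinput : String) (i : Int) (parenend : Int) (parenstack : List String) : Int :=
  (((PySem.List.pyRange i parenend 1).foldl (pcStep rawinput) (none, parenstack)).1).getD (-1)

-- ===== PRECONDITION & SPEC =====
-- Pre_ excludes exactly: negative-index wraparound starts (i < 0 while i < parenend), scans past
-- the end of the string (parenend > len, where A eventually raises IndexError), and any ')' in
-- [i, parenend) reached at paren depth 0 (where A's pop() raises IndexError). This is slightly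
-- stronger than A's raising condition when a top-level comma precedes the bad position (A and B
-- still return the same value on such excluded inputs — see the cites in the claim).
def Pre_parsecomma (rawinput : String) (i : Int) (parenend : Int) (parenstack : List String) : Prop :=
  parenend ≤ i ∨
  (0 ≤ i ∧ parenend ≤ (rawinput.toList.length : Int) ∧
   ∀ j ∈ PySem.List.pyRange i parenend 1,
     rawinput.toList[j.toNat]? = some ')' →
       0 < (parenstack.length : Int)
           + (((rawinput.toList.take j.toNat).drop i.toNat).count '(' : Int)
           - (((rawinput.toList.take j.toNat).drop i.toNat).count ')' : Int))
instance (rawinput : String) (i : Int) (parenend : Int) (parenstack : List String) : Decidable (Pre_parsecomma rawinput i parenend parenstack) := by unfold Pre_parsecomma; infer_instance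

def pvWitness_parsecomma : String × Int × Int × List String := ("f(a,b),c", 2, 8, ["("])

def Spec_parsecomma (rawinput : String) (i : Int) (parenend : Int) (parenstack : List String) (out : Int) : Prop := out = parsecomma_alt rawinput i parenend parenstack
instance (rawinput : String) (i : Int) (parenend : Int) (parenstack : List String) (out : Int) : Decidable (Spec_parsecomma rawinput i parenend parenstack out) := by unfold Spec_parsecomma; infer_instance

-- ===== CLAIM (what is proved, stated in full; the proofs are below) =====
def Claim_equal_parsecomma : Prop := ∀ (rawinput : String) (i : Int) (parenend : Int) (parenstack : List String), Dom_parsecomma rawinput i parenend parenstack → Pre_parsecomma rawinput i parenend parenstack → Spec_parsecomma rawinput i parenend parenstack (parsecomma rawinput i parenend parenstack)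

-- ===== LEMMAS AND PROOFS =====

-- once B's loop has decided on a result, the rest of the fold changes nothing
lemma pcStep_found (rawinput : String) (l : List Int) (r : Int) (s : List String) :
    l.foldl (pcStep rawinput) (some r, s) = (some r, s) := by
  induction l with
  | nil => rfl
  | cons x xs ih => simpa [pcStep] using ih


-- segment [i, j) of the string, extended one character to the left
lemma seg_cons (cs : List Char) (i j : Int) (h0 : 0 ≤ i) (hij : i < j) (hjl : j ≤ (cs.length : Int)) :
    (cs.take j.toNat).drop i.toNat
      = cs[i.toNat]'(by omega) :: (cs.take j.toNat).drop (i.toNat + 1) := by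
  have h1 : i.toNat < (cs.take j.toNat).length := by
    simp only [List.length_take]; omega
  rw [List.drop_eq_getElem_cons h1, List.getElem_take]

-- the depth invariant survives one step of the scan
lemma bal_next (cs : List Char) (i parenend : Int) (L L' : Int)
    (h0 : 0 ≤ i) (hlen : parenend ≤ (cs.length : Int)) (hi : i.toNat < cs.length)
    (hbal : ∀ j ∈ PySem.List.pyRange i parenend 1, cs[j.toNat]? = some ')' →
      0 < L + (((cs.take j.toNat).drop i.toNat).count '(' : Int)
            - (((cs.take j.toNat).drop i.toNat).count ')' : Int))
    (hL' : L' = L + (if cs[i.toNat] = '(' then 1 else if cs[i.toNat] = ')' then -1 else 0)) :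
    ∀ j ∈ PySem.List.pyRange (i+1) parenend 1, cs[j.toNat]? = some ')' →
      0 < L' + (((cs.take j.toNat).drop (i+1).toNat).count '(' : Int)
            - (((cs.take j.toNat).drop (i+1).toNat).count ')' : Int) := by
  intro j hj hj'
  rw [PySem.List.mem_pyRange_one] at hj
  have h := hbal j (by rw [PySem.List.mem_pyRange_one]; omega) hj'
  rw [seg_cons cs i j h0 (by omega) (by omega), List.count_cons, List.count_cons] at h
  have ht : (i+1).toNat = i.toNat + 1 := by omega
  rw [ht]
  subst hL'
  by_cases hp : cs[i.toNat] = '(' <;> by_cases hq : cs[i.toNat] = ')' <;>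
    simp [hp, hq] at h ⊢ <;> omega

lemma main_lemma (rawinput : String) :
    ∀ (n : Nat) (i parenend : Int) (parenstack : List String),
      (parenend - i).toNat = n →
      0 ≤ i → parenend ≤ (rawinput.toList.length : Int) →
      (∀ j ∈ PySem.List.pyRange i parenend 1,
        rawinput.toList[j.toNat]? = some ')' →
          0 < (parenstack.length : Int)
              + (((rawinput.toList.take j.toNat).drop i.toNat).count '(' : Int)
              - (((rawinput.toList.take j.toNat).drop i.toNat).count ')' : Int)) →
      parsecomma rawinput i parenend parenstack = parsecomma_alt rawinput i parenend parenstack := by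

  intro n
  induction n with
  | zero =>
    intro i parenend parenstack hn h0 hlen hbal
    rw [parsecomma]
    unfold parsecomma_alt
    rw [PySem.List.pyRange_one_eq_nil (by omega)]
    simp [show i ≥ parenend by omega]
  | succ n ih =>
    intro i parenend parenstack hn h0 hlen hbal
    have hlt : i < parenend := by omega
    have hi : i.toNat < rawinput.toList.length := by omega
    have hget : PySem.List.pyGet? rawinput.toList i = some rawinput.toList[i.toNat] :=
      PySem.List.pyGet?_eq_some_getElem _ h0 (by omega)
    -- the character scanned this step
    by_cases hp : rawinput.toList[i.toNat] = '('
    · -- push a '('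
      have hA : parsecomma rawinput i parenend parenstack
          = parsecomma rawinput (i+1) parenend (parenstack ++ ["("]) := by
        rw [parsecomma]
        simp [show ¬ i ≥ parenend by omega, hget, hp]
      have hstep : pcStep rawinput (none, parenstack) i = (none, parenstack ++ ["("]) := by
        simp [pcStep, hget, hp]
      have hB : parsecomma_alt rawinput i parenend parenstack
          = parsecomma_alt rawinput (i+1) parenend (parenstack ++ ["("]) := by
        unfold parsecomma_alt
        rw [PySem.List.pyRange_one_cons hlt, List.foldl_cons, hstep]
      rw [hA, hB]
      refine ih (i+1) parenend _ (by omega) (by omega) hlen ?_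
      have := bal_next rawinput.toList i parenend (parenstack.length : Int)
        ((parenstack ++ ["("]).length : Int) h0 hlen hi hbal (by simp [hp])
      simpa using this
    · by_cases hq : rawinput.toList[i.toNat] = ')'
      · -- pop
        have hne : parenstack ≠ [] := by
          have h := hbal i (by rw [PySem.List.mem_pyRange_one]; omega)
            (by rw [List.getElem?_eq_getElem hi, hq])
          have hnil : (rawinput.toList.take i.toNat).drop i.toNat = [] := by
            rw [List.drop_eq_nil_iff]; simp [List.length_take]
          rw [hnil] at h
          simp at h
          intro hcon; rw [hcon] at h; simp at h
        have hpop : PySem.List.pop? parenstack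
            = some (parenstack.getLast hne, parenstack.dropLast) := by
          conv_lhs => rw [← List.dropLast_concat_getLast hne]
          exact PySem.List.pop?_last _ _
        have hA : parsecomma rawinput i parenend parenstack
            = parsecomma rawinput (i+1) parenend parenstack.dropLast := by
          rw [parsecomma]
          simp [show ¬ i ≥ parenend by omega, hget, hq, hpop]
        have hstep : pcStep rawinput (none, parenstack) i = (none, parenstack.dropLast) := by
          simp [pcStep, hget, hq]
        have hB : parsecomma_alt rawinput i parenend parenstack
            = parsecomma_alt rawinput (i+1) parenend parenstack.dropLast := by
          unfold parsecomma_alt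
          rw [PySem.List.pyRange_one_cons hlt, List.foldl_cons, hstep]
        rw [hA, hB]
        refine ih (i+1) parenend _ (by omega) (by omega) hlen ?_
        have := bal_next rawinput.toList i parenend (parenstack.length : Int)
          (parenstack.dropLast.length : Int) h0 hlen hi hbal
          (by simp [hq, List.length_dropLast]
              have : 0 < parenstack.length := List.length_pos_of_ne_nil hne
              omega)
        simpa using this
      · -- ordinary character: stack unchanged
        by_cases hc : parenstack = [] ∧ rawinput.toList[i.toNat] = ','
        · -- both return i
          have hA : parsecomma rawinput i parenend parenstack = i := by
            rw [parsecomma]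
            simp [show ¬ i ≥ parenend by omega, hget, hc.1, hc.2]
          have hstep : pcStep rawinput (none, parenstack) i = (some i, parenstack) := by
            simp [pcStep, hget, hc.1, hc.2]
          have hB : parsecomma_alt rawinput i parenend parenstack = i := by
            unfold parsecomma_alt
            rw [PySem.List.pyRange_one_cons hlt, List.foldl_cons, hstep, pcStep_found]
            rfl
          rw [hA, hB]
        · have hA : parsecomma rawinput i parenend parenstack
              = parsecomma rawinput (i+1) parenend parenstack := by
            rw [parsecomma]
            simp only [show ¬ i ≥ parenend by omega, dite_false]
            simp [hget, hp, hq]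
            intro h1 h2
            exact absurd ⟨h1, h2⟩ hc
          have hstep : pcStep rawinput (none, parenstack) i = (none, parenstack) := by
            simp [pcStep, hget, hp, hq]
            intro h1 h2
            exact absurd ⟨h1, h2⟩ hc
          have hB : parsecomma_alt rawinput i parenend parenstack
              = parsecomma_alt rawinput (i+1) parenend parenstack := by
            unfold parsecomma_alt
            rw [PySem.List.pyRange_one_cons hlt, List.foldl_cons, hstep]
          rw [hA, hB]
          refine ih (i+1) parenend _ (by omega) (by omega) hlen ?_
          have := bal_next rawinput.toList i parenend (parenstack.length : Int)
            (parenstack.length : Int) h0 hlen hi hbal (by simp [hp, hq])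
          simpa using this


-- ===== VERDICT (by name: the statement is the Claim_ definition above) =====
theorem parsecomma_spec : Claim_equal_parsecomma := by
  intro rawinput i parenend parenstack _ hpre
  unfold Spec_parsecomma
  rcases hpre with h | ⟨h0, hlen, hbal⟩
  · unfold parsecomma parsecomma_alt
    rw [PySem.List.pyRange_one_eq_nil h]
    simp [h]
  · exact main_lemma rawinput (parenend - i).toNat i parenend parenstack rfl h0 hlen hbal
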